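-- pv_equiv track=rewrite | github.com/calico32/apcsp-labs | apcsp/labs/operator/reverse.py | calculate_units
-- ===== SOURCE A (Python) =====
-- units = [
--     ("minute", 60),
--     ("hour", 60),
--     ("day", 24),
--     ("year", 365),
-- ]
--
-- def comma_separated_and(l: list[str]) -> str:
--     if len(l) == 0:
--         return ""
--     elif len(l) == 1:
--         return l[0]
--     elif len(l) == 2:
--         return f"{l[0]} and {l[1]}"
--     else:
--         return f'{", ".join(l[:-1])}, and {l[-1]}'
--
-- def format_units(values: list[tuple[int, str]]) -> str:
--     out: list[str] = []
--     for count, name in values: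
--         out.append(f'{count} {name}{"s" if count != 1 else ""}')
--
--     return comma_separated_and(out)
--
-- def calculate_units(seconds: int) -> str:
--     values: list[tuple[int, str]] = [(seconds, "second")]
--
--     for name, conversion in units:
--         current_count, current_name = values[0]
--         next_count = current_count // conversion
--
--         if next_count == 0:
--             break
--
--         values[0] = (current_count % conversion, current_name)
--         values.insert(0, (next_count, name))
--
--     return format_units(values)
-- ===== SOURCE B (Python) =====
-- # Single top-down pass over a precomputed cumulative-factor table instead of
-- # A's bottom-up carry loop with insert-at-front.
--
-- UNITS_DESC = [
--     ("year", 31536000, 1),   # ratio of the top unit is never used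
--     ("day", 86400, 365),
--     ("hour", 3600, 24),
--     ("minute", 60, 60),
--     ("second", 1, 60),
-- ]
--
-- def comma_separated_and(l: list[str]) -> str:
--     if len(l) == 0:
--         return ""
--     elif len(l) == 1:
--         return l[0]
--     elif len(l) == 2:
--         return f"{l[0]} and {l[1]}"
--     else:
--         return f'{", ".join(l[:-1])}, and {l[-1]}'
--
-- def format_units(values: list[tuple[int, str]]) -> str:
--     out: list[str] = []
--     for count, name in values:
--         out.append(f'{count} {name}{"s" if count != 1 else ""}')
--     return comma_separated_and(out)
--
-- def calculate_units(seconds: int) -> str: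
--     parts: list[tuple[int, str]] = []
--     found = False
--     for name, factor, ratio in UNITS_DESC:
--         q = seconds // factor
--         if not found:
--             if q != 0 or factor == 1:
--                 found = True
--                 parts.append((q, name))
--         else:
--             parts.append((q % ratio, name))
--     return format_units(parts)
-- ===== Notes on version B (the rewrite author's own statement) =====
-- stated objective: alternative
-- what changed: Replaces A's bottom-up carry loop (repeated floordiv of the previous quotient with list.insert at the front and an early break) with a single top-down pass over a precomputed cumulative-factor table, computing each unit's count directly as seconds//factor (top unit) or (seconds//factor)%ratio (lower units).
import Mathlib
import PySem

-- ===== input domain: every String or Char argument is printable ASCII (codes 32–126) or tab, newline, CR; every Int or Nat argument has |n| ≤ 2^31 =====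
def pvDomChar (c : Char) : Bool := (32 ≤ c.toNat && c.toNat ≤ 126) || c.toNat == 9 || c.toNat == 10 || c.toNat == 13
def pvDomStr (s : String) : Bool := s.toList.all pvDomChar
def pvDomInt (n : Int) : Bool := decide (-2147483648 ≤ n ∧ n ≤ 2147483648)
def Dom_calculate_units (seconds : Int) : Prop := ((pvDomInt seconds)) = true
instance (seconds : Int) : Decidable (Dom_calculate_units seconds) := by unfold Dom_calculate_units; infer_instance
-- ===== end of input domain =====

-- B replaces A's bottom-up carry loop (with insert-at-front and early break) by one
-- top-down pass over a precomputed cumulative-factor table (objective: alternative).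

-- ===== PORT A =====
-- shared module helpers (identical code in Source A and Source B)
def comma_separated_and (l : List String) : String :=
  if l.length = 0 then ""
  else if l.length = 1 then (PySem.List.pyGet? l 0).getD ""
  else if l.length = 2 then (PySem.List.pyGet? l 0).getD "" ++ " and " ++ (PySem.List.pyGet? l 1).getD ""
  else PySem.Str.join ", " (PySem.List.slice l none (some (-1))) ++ ", and " ++ (PySem.List.pyGet? l (-1)).getD ""

def format_units (values : List (Int × String)) : String :=
  comma_separated_and
    (values.foldl (fun out cn =>
      out ++ [PySem.Int.toStr cn.1 ++ " " ++ cn.2 ++ (if cn.1 ≠ 1 then "s" else "")]) [])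

def unitsA : List (String × Int) := [("minute", 60), ("hour", 60), ("day", 24), ("year", 365)]

def loopA : List (String × Int) → List (Int × String) → List (Int × String)
  | [], values => values
  | (name, conversion) :: rest, values =>
    match values with
    | [] => []  -- unreachable: values starts and stays nonempty
    | (current_count, current_name) :: tail =>
      let next_count := PySem.Int.floordiv current_count conversion
      if next_count = 0 then (current_count, current_name) :: tail
      else loopA rest ((next_count, name) :: (PySem.Int.mod current_count conversion, current_name) :: tail)

def calculate_units (seconds : Int) : String :=
  format_units (loopA unitsA [(seconds, "second")])

-- ===== PORT B =====
def unitsDescB : List (String × Int × Int) :=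
  [("year", 31536000, 1), ("day", 86400, 365), ("hour", 3600, 24), ("minute", 60, 60), ("second", 1, 60)]

def loopB (seconds : Int) : List (String × Int × Int) → Bool → List (Int × String) → List (Int × String)
  | [], _, parts => parts
  | (name, factor, ratio) :: rest, found, parts =>
    let q := PySem.Int.floordiv seconds factor
    if found = false then
      if q ≠ 0 ∨ factor = 1 then loopB seconds rest true (parts ++ [(q, name)])
      else loopB seconds rest false parts
    else loopB seconds rest true (parts ++ [(PySem.Int.mod q ratio, name)])

def calculate_units_alt (seconds : Int) : String :=
  format_units (loopB seconds unitsDescB false [])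

-- ===== PRECONDITION & SPEC =====
def Spec_calculate_units (seconds : Int) (out : String) : Prop := out = calculate_units_alt seconds
instance (seconds : Int) (out : String) : Decidable (Spec_calculate_units seconds out) := by unfold Spec_calculate_units; infer_instance

-- ===== CLAIM (what is proved, stated in full; the proofs are below) =====
def Claim_equal_calculate_units : Prop := ∀ (seconds : Int), Dom_calculate_units seconds → Spec_calculate_units seconds (calculate_units seconds)

-- ===== LEMMAS AND PROOFS =====
theorem lists_eq (s : Int) : loopA unitsA [(s, "second")] = loopB s unitsDescB false [] := by
  have h21 : s / 60 / 60 = s / 3600 := by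
    rw [Int.ediv_ediv_of_nonneg (by norm_num : (0:Int) ≤ 60)]; norm_num
  have h32 : s / 3600 / 24 = s / 86400 := by
    rw [Int.ediv_ediv_of_nonneg (by norm_num : (0:Int) ≤ 3600)]; norm_num
  have h43 : s / 86400 / 365 = s / 31536000 := by
    rw [Int.ediv_ediv_of_nonneg (by norm_num : (0:Int) ≤ 86400)]; norm_num
  by_cases h1 : s / 60 = 0
  · have h2 : s / 3600 = 0 := by rw [← h21, h1]; norm_num
    have h3 : s / 86400 = 0 := by rw [← h32, h2]; norm_num
    have h4 : s / 31536000 = 0 := by rw [← h43, h3]; norm_num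
    simp [loopA, unitsA, loopB, unitsDescB, h21, h32, h43, h1, h2, h3, h4]
  · by_cases h2 : s / 3600 = 0
    · have h3 : s / 86400 = 0 := by rw [← h32, h2]; norm_num
      have h4 : s / 31536000 = 0 := by rw [← h43, h3]; norm_num
      simp [loopA, unitsA, loopB, unitsDescB, h21, h32, h43, h1, h2, h3, h4]
    · by_cases h3 : s / 86400 = 0
      · have h4 : s / 31536000 = 0 := by rw [← h43, h3]; norm_num
        simp [loopA, unitsA, loopB, unitsDescB, h21, h32, h43, h1, h2, h3, h4]
      · by_cases h4 : s / 31536000 = 0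
        · simp [loopA, unitsA, loopB, unitsDescB, h21, h32, h43, h1, h2, h3, h4]
        · simp [loopA, unitsA, loopB, unitsDescB, h21, h32, h43, h1, h2, h3, h4]

-- ===== VERDICT (by name: the statement is the Claim_ definition above) =====
theorem calculate_units_spec : Claim_equal_calculate_units := by
  intro s _
  unfold Spec_calculate_units calculate_units calculate_units_alt
  rw [lists_eq]
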